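/- GENERATED by tools/from_farm_form.py from prooffarm-gif/accepted/strncmp/Proof.lean (a worked proof of the farm's unit `strncmp`,
   accepted by the verdict) — do not edit. -/
import Gif.Spec.Units.strncmp
import Gif.Spec.AllSegs
import Asan.CheckWalk

open X86 X86.User Asan ProgX.Base

set_option maxRecDepth 4000
set_option maxHeartbeats 4000000

namespace Gif.Spec.strncmp

/-- Where a live range of `n > 0` bytes at `a` is, as the one arithmetic fact the walk needs: above the text, below the
shadow, and off this function's stack (below `rsp + 8`). -/
def sn_Where (rsp a n : Nat) : Prop :=
  0x140000 ≤ a ∧ a + n ≤ 0xC00000 ∧ (rsp + 8 ≤ a ∨ a + n ≤ 0x700000 ∨ 0x800000 ≤ a)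

end Gif.Spec.strncmp

/-- `strncmp` (cextra.c:10) satisfies its contract: six pushes and `sub rsp, 8`, a loop (`u_loop` / `u_loop_back`) with two check
calls and two byte loads inside, three ways out (`i ≥ n`; a difference at `i`; the terminator at `i`), pops, ret. It stores
nothing but its own frame: the shadow is untouched. -/
theorem Gif.Spec.Proved.strncmp_ok : Gif.Spec.strncmp.Statement := by
  unfold Gif.Spec.strncmp.Statement
  intro Lay hLay μ hμ u₀ hcode hload1 others frames u ret he hpre
  v_entry he
  obtain ⟨hsh, hlive⟩ := hpre
  -- where the two ranges are: one arithmetic fact each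
  have hsp := hsh.rsp
  have hwhere : (u.reg .rdx).toNat = 0 ∨
      (Gif.Spec.strncmp.sn_Where (u.reg .rsp).toNat (u.reg .rdi).toNat (u.reg .rdx).toNat ∧
       Gif.Spec.strncmp.sn_Where (u.reg .rsp).toNat (u.reg .rsi).toNat (u.reg .rdx).toNat) := by
    rcases hlive with h0 | ⟨hla, hlb⟩
    · exact Or.inl h0
    · by_cases hn : (u.reg .rdx).toNat = 0
      · exact Or.inl hn
      · exact Or.inr ⟨hla.where_ hsh.inv hsh.offText (by omega), hlb.where_ hsh.inv hsh.offText (by omega)⟩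
  unfold Gif.Spec.strncmp.sn_Where at hwhere
  -- 0x105d80 cextra.c:10 the prologue … 0x105d9c `jmp` to the loop head
  u_walk hcode [hμ.vendor] until [Gif.L.strncmp.loop1] span [ProgX.Base.L.textLo, ProgX.Base.L.textHi] side (v_side)
  -- the loop head 0x105dad (cextra.c:12 `for (i = 0; i < n; i++)`): what varies is generalised, the exact memory is replaced
  -- by what stays true
  obtain ⟨i, hi, hile⟩ : ∃ i : Nat, s_105d9c.reg .rbx = UInt64.ofNat i ∧ i ≤ (u.reg .rdx).toNat :=
    ⟨0, w_rbx, Nat.zero_le _⟩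
  have hsame : Mem.SameExcept [⟨(u.reg .rsp).toNat - 64, (u.reg .rsp).toNat⟩] u.mem s_105d9c.mem := by
    u_same
  have hun : ShadowUntouched u.mem s_105d9c.mem := by v_untouched
  have hs1 : UInt64.ofNat (s_105d9c.mem.readLE (u.reg .rsp - 8) 8) = u.reg .r15 := by u_resolve
  have hs2 : UInt64.ofNat (s_105d9c.mem.readLE (u.reg .rsp - 16) 8) = u.reg .r14 := by u_resolve
  have hs3 : UInt64.ofNat (s_105d9c.mem.readLE (u.reg .rsp - 24) 8) = u.reg .r13 := by u_resolve
  have hs4 : UInt64.ofNat (s_105d9c.mem.readLE (u.reg .rsp - 32) 8) = u.reg .r12 := by u_resolve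
  have hs5 : UInt64.ofNat (s_105d9c.mem.readLE (u.reg .rsp - 40) 8) = u.reg .rbp := by u_resolve
  have hs6 : UInt64.ofNat (s_105d9c.mem.readLE (u.reg .rsp - 48) 8) = u.reg .rbx := by u_resolve
  have hs0 : UInt64.ofNat (s_105d9c.mem.readLE (u.reg .rsp) 8) = ret := by u_resolve
  have hdf : s_105d9c.flags .df = false := by
    rw [w_flags]
    simp only [X86.User.df_setStatus]
    exact he_df
  replace w_kept := w_kept.mono_all (S' := [.rbx, .r12, .r13, .r14, .r15, .rsp, .rbp, .rdi, .rax, .rdx]) (by rfl)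
  clear w_mem w_flags w_rbx
  u_loop [i] (fun v => (u.reg .rdx).toNat - (v.reg .rbx).toNat)
  u_walk hcode [hμ.vendor] until [Gif.L.strncmp.loop1] span [ProgX.Base.L.textLo, ProgX.Base.L.textHi] side (v_side)
  · -- 0x105db9, the check of the load `a[i]` (cextra.c:13): the byte is inside the range at `a`
    obtain ⟨hla, hlb⟩ := hlive.resolve_left (by u_omega)
    obtain ⟨⟨ha1, ha2, ha3⟩, hb1, hb2, hb3⟩ := hwhere.resolve_left (by u_omega)
    have hun' : ShadowUntouched u.mem s_105db9.mem := by v_untouched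
    exact hla.accSmall hsh.inv hun' _ 1 (by decide) (by u_omega) (by u_omega)
  · -- 0x105dc9, the check of the load `b[i]` (cextra.c:14): the byte is inside the range at `b`
    obtain ⟨hla, hlb⟩ := hlive.resolve_left (by u_omega)
    obtain ⟨⟨ha1, ha2, ha3⟩, hb1, hb2, hb3⟩ := hwhere.resolve_left (by u_omega)
    have hun' : ShadowUntouched u.mem s_105dc9.mem := by v_untouched
    exact hlb.accSmall hsh.inv hun' _ 1 (by decide) (by u_omega) (by u_omega)
  · -- the exit `i ≥ n` (0x105de4, cextra.c:22 `return 0`), walked to the `ret`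
    refine ReachVia.done (Or.inl ?_)
    v_returned
    -- the post: no store went to the shadow
    show ShadowUntouched u.mem _
    v_untouched
  · -- the exit at a difference (0x105d9e, cextra.c:16 `return ca - cb`), walked to the `ret`
    refine ReachVia.done (Or.inl ?_)
    v_returned
    -- the post: no store went to the shadow
    show ShadowUntouched u.mem _
    v_untouched
  · -- the back edge (0x105ddb `jne` taken, 0x105da9 `add rbx, 1`): `a[i] = b[i] ≠ 0`
    u_loop_back [i + 1]
    · -- the counter
      rw [w_rbx, UInt64.ofNat_add]
      rfl
    · -- still at most `n`: the `jae` was not taken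
      u_omega
    · -- still no store to the shadow
      v_untouched
    · -- the direction flag: the check kept it (`w_df_105dc9`), `cmp`, `test` and `add` wrote status flags only
      rw [w_flags]
      simp only [X86.User.df_setStatus]
      assumption
    · -- the measure `n - i` decreases
      rw [w_rbx]
      u_omega
  · -- the exit at the terminator (0x105ddd, cextra.c:19 `return 0`), walked to the `ret`
    refine ReachVia.done (Or.inl ?_)
    v_returned
    -- the post: no store went to the shadow
    show ShadowUntouched u.mem _
    v_untouched
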